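-- pv_equiv track=rewrite | github.com/Sanchay117/RISCV-Assembler-Simulator | Simulator.py | two_complement_addition
-- ===== SOURCE A (Python) =====
-- def two_complement_addition(a, b):
--     # assumes both operands are of same length
--     x=len(a)
--     result=''
--     carry=0
--     for i in range(x-1,-1,-1):
--         res = carry
--         res += 1 if a[i] == '1' else 0
--         res += 1 if b[i] == '1' else 0
--         result = ('1' if res % 2 == 1 else '0') + result
--         carry = 0 if res < 2 else 1
--     return result
-- ===== SOURCE B (Python) =====
-- def two_complement_addition(a, b):
--     x = len(a)
--     s = 0
--     for ca, cb in zip(a, b):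
--         s = 2 * s + (ca == '1') + (cb == '1')
--     s %= 1 << x
--     return format(s, '0%db' % x) if x else ''
-- ===== Notes on version B (the rewrite author's own statement) =====
-- stated objective: faster
-- what changed: B replaces A's per-bit loop with quadratic string prepending by one integer accumulation pass over the zipped bit strings, a mask to len(a) bits, and a single binary format call.
import Mathlib
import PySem

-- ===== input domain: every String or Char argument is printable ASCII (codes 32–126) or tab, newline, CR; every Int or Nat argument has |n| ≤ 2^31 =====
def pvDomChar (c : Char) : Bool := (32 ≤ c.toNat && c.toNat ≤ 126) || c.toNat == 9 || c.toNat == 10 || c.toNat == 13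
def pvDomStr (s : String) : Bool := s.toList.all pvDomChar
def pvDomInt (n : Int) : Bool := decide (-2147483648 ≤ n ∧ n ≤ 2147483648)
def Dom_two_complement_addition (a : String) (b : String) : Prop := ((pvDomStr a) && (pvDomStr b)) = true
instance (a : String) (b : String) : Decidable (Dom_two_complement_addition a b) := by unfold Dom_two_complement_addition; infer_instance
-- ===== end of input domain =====

-- B replaces A's quadratic bit-by-bit string prepending with one integer accumulation pass,
-- a mask and a binary format (objective: faster).


-- ===== PORT A =====
-- literal port of A: loop i = x-1 .. 0, carry and result string prepended bit by bit
def two_complement_addition (a : String) (b : String) : String :=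
  let la := a.toList
  let lb := b.toList
  let x : Int := PySem.Chars.len la
  let st :=
    (PySem.List.pyRange (x - 1) (-1) (-1)).foldl
      (fun (st : List Char × Int) i =>
        let res := st.2
        let res := res + (if PySem.List.pyGetD la i ' ' = '1' then 1 else 0)
        let res := res + (if PySem.List.pyGetD lb i ' ' = '1' then 1 else 0)
        ((if PySem.Int.mod res 2 = 1 then '1' else '0') :: st.1,
         if res < 2 then 0 else 1))
      (([] : List Char), (0 : Int))
  String.ofList st.1

-- ===== PORT B =====
-- port of format(s, '0xb'): x binary digits of s, built low bit first onto acc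
def fmtBin : Nat → Nat → List Char → List Char
  | 0, _, acc => acc
  | n + 1, s, acc => fmtBin n (s / 2) ((if s % 2 = 1 then '1' else '0') :: acc)

def two_complement_addition_alt (a : String) (b : String) : String :=
  let x := a.toList.length
  let s := (a.toList.zip b.toList).foldl
    (fun s p => 2 * s + (if p.1 = '1' then 1 else 0) + (if p.2 = '1' then 1 else 0)) 0
  let s := s % (1 <<< x)
  if x = 0 then "" else String.ofList (fmtBin x s [])

-- ===== PRECONDITION & SPEC =====
-- A indexes b[i] for every i < len(a): with len(b) < len(a) it raises IndexError, so exactly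
-- those inputs are excluded.
def Pre_two_complement_addition (a : String) (b : String) : Prop :=
  a.toList.length ≤ b.toList.length
instance (a : String) (b : String) : Decidable (Pre_two_complement_addition a b) := by
  unfold Pre_two_complement_addition; infer_instance

def pvWitness_two_complement_addition : String × String := ("101", "011")

def Spec_two_complement_addition (a : String) (b : String) (out : String) : Prop := out = two_complement_addition_alt a b
instance (a : String) (b : String) (out : String) : Decidable (Spec_two_complement_addition a b out) := by unfold Spec_two_complement_addition; infer_instance

-- ===== CLAIM (what is proved, stated in full; the proofs are below) =====
def Claim_equal_two_complement_addition : Prop := ∀ (a : String) (b : String), Dom_two_complement_addition a b → Pre_two_complement_addition a b → Spec_two_complement_addition a b (two_complement_addition a b)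

-- ===== LEMMAS AND PROOFS =====

-- carry-ripple recursion equivalent to A's loop, over (a-bit, b-bit) pairs LSB first
def ago : List (Char × Char) → Int → List Char → List Char
  | [], _, acc => acc
  | p :: t, c, acc =>
    let r : Int := c + (if p.1 = '1' then 1 else 0) + (if p.2 = '1' then 1 else 0)
    ago t (if r < 2 then 0 else 1) ((if PySem.Int.mod r 2 = 1 then '1' else '0') :: acc)

-- little-endian value of the pair list (sum of both operands)
def vR : List (Char × Char) → Nat
  | [] => 0
  | p :: t => (if p.1 = '1' then 1 else 0) + (if p.2 = '1' then 1 else 0) + 2 * vR t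

theorem vR_append_singleton (l : List (Char × Char)) (p : Char × Char) :
    vR (l ++ [p]) = vR l + ((if p.1 = '1' then 1 else 0) + (if p.2 = '1' then 1 else 0)) * 2 ^ l.length := by
  induction l with
  | nil => simp [vR]
  | cons q t ih => simp [vR, ih, pow_succ]; ring

theorem bfold_eq (l : List (Char × Char)) (s0 : Nat) :
    l.foldl (fun s p => 2 * s + (if p.1 = '1' then 1 else 0) + (if p.2 = '1' then 1 else 0)) s0
      = s0 * 2 ^ l.length + vR l.reverse := by
  induction l generalizing s0 with
  | nil => simp [vR]
  | cons p t ih =>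
    simp only [List.foldl_cons, List.reverse_cons, ih, vR_append_singleton]
    simp [pow_succ]; ring

theorem loopA (la lb : List Char) : ∀ (n : Nat), n ≤ la.length → n ≤ lb.length →
    ∀ (c : Int) (acc : List Char),
    ((PySem.List.pyRange ((n : Int) - 1) (-1) (-1)).foldl
      (fun (st : List Char × Int) i =>
        let res := st.2
        let res := res + (if PySem.List.pyGetD la i ' ' = '1' then 1 else 0)
        let res := res + (if PySem.List.pyGetD lb i ' ' = '1' then 1 else 0)
        ((if PySem.Int.mod res 2 = 1 then '1' else '0') :: st.1,
         if res < 2 then 0 else 1))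
      (acc, c)).1
    = ago (((la.take n).zip (lb.take n)).reverse) c acc := by
  intro n
  induction n with
  | zero =>
    intro _ _ c acc
    rw [show ((0 : Nat) : Int) - 1 = -1 by norm_num,
      PySem.List.pyRange_neg_one_eq_nil (by norm_num)]
    simp [ago]
  | succ n ih =>
    intro hla hlb c acc
    rw [show ((n + 1 : Nat) : Int) - 1 = (n : Int) by push_cast; ring,
      PySem.List.pyRange_neg_one_cons (by omega)]
    simp only [List.foldl_cons]
    rw [ih (by omega) (by omega)]
    have ha : n < la.length := by omega
    have hb : n < lb.length := by omega
    rw [List.take_add_one, List.take_add_one, List.getElem?_eq_getElem ha, List.getElem?_eq_getElem hb]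
    rw [List.zip_append (by simp [List.length_take]; omega)]
    simp only [Option.toList_some, List.reverse_append, List.reverse_cons, List.reverse_nil,
      List.nil_append, List.zip_cons_cons, List.zip_nil_right, List.singleton_append]
    simp only [PySem.List.pyGetD_natCast, List.getD_eq_getElem _ _ ha, List.getD_eq_getElem _ _ hb]
    simp only [ago]

theorem fmtBin_arg_key (v n r' : Nat) : (r' + 2 * v) % (2 ^ n * 2) / 2 = (v + r' / 2) % 2 ^ n := by
  rw [mul_comm (2 ^ n) 2, Nat.mod_mul_right_div_self]
  congr 1; omega

theorem ago_eq (l : List (Char × Char)) : ∀ (c : Int), (c = 0 ∨ c = 1) → ∀ (acc : List Char),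
    ago l c acc = fmtBin l.length ((vR l + c.toNat) % 2 ^ l.length) acc := by
  induction l with
  | nil => intro c hc acc; simp [vR, ago, fmtBin]
  | cons p t ih =>
    intro c hc acc
    simp only [ago, vR, List.length_cons]
    have hc0 : (0 : Int) ≤ c ∧ c ≤ 1 := by rcases hc with rfl | rfl <;> norm_num
    have eA : (if p.1 = '1' then (1 : Int) else 0) = ((if p.1 = '1' then 1 else 0 : Nat) : Int) := by
      split_ifs <;> simp
    have eB : (if p.2 = '1' then (1 : Int) else 0) = ((if p.2 = '1' then 1 else 0 : Nat) : Int) := by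
      split_ifs <;> simp
    have hr : c + (if p.1 = '1' then (1 : Int) else 0) + (if p.2 = '1' then 1 else 0)
        = (((if p.1 = '1' then 1 else 0 : Nat) + (if p.2 = '1' then 1 else 0 : Nat) + c.toNat : Nat) : Int) := by
      rw [eA, eB]; push_cast; omega
    rw [hr, ih _ (by split_ifs <;> simp), pow_succ, fmtBin]
    congr 1
    · rw [show ((if p.1 = '1' then 1 else 0) + (if p.2 = '1' then 1 else 0) + 2 * vR t + c.toNat)
          = (((if p.1 = '1' then 1 else 0) + (if p.2 = '1' then 1 else 0) + c.toNat) + 2 * vR t) from by ring,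
        fmtBin_arg_key]
      congr 1
      split_ifs with h <;> omega
    · rw [Nat.mod_mod_of_dvd _ ⟨2 ^ t.length, by ring⟩,
        show PySem.Int.mod ((((if p.1 = '1' then 1 else 0) + (if p.2 = '1' then 1 else 0) + c.toNat : Nat)) : Int) 2
          = ((((if p.1 = '1' then 1 else 0) + (if p.2 = '1' then 1 else 0) + c.toNat) % 2 : Nat) : Int) from by
            exact_mod_cast PySem.Int.mod_natCast _ 2]
      congr 1
      exact if_congr (by constructor <;> intro h <;> omega) rfl rfl
theorem two_complement_addition_spec : Claim_equal_two_complement_addition := by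
  unfold Claim_equal_two_complement_addition
  intro a b _ hpre
  unfold Pre_two_complement_addition at hpre
  unfold Spec_two_complement_addition two_complement_addition two_complement_addition_alt
  have hzip : (a.toList.take a.toList.length).zip (b.toList.take a.toList.length)
      = a.toList.zip b.toList := by
    rw [List.take_length]
    conv_rhs => rw [← List.take_of_length_le (show (a.toList.zip b.toList).length ≤ a.toList.length by simp)]
    rw [List.zip_eq_zipWith, List.zip_eq_zipWith, List.take_zipWith, List.take_length]
  have hlen : ((a.toList.zip b.toList).reverse).length = a.toList.length := by
    rw [List.length_reverse, List.length_zip]; omega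
  simp only [PySem.Chars.len_eq]
  rw [loopA a.toList b.toList a.toList.length le_rfl hpre 0 [], hzip,
    ago_eq _ 0 (Or.inl rfl) [], hlen, bfold_eq]
  simp only [Nat.one_shiftLeft, zero_mul, Nat.zero_add, Int.toNat_zero, Nat.add_zero]
  by_cases h0 : a.toList.length = 0
  · rw [if_pos h0, h0]; rfl
  · rw [if_neg h0]
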